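-- pv_equiv track=rewrite | github.com/develersrl/git-externals | gittify.py | extract_repo_name
-- ===== SOURCE A (Python) =====
-- def extract_repo_name(remote_name):
--     if remote_name[0] == '/':
--         remote_name = remote_name[1:]
--
--     if remote_name.startswith('svn/'):
--         remote_name = remote_name[len('svn/'):]
--
--     if remote_name.startswith('packages/'):
--         i = len('packages/') - 1
--         return 'packages/' + extract_repo_name(remote_name[i:])
--
--     j = remote_name.find('/')
--     if j < 0:
--         return remote_name
--     return remote_name[:j]
-- ===== SOURCE B (Python) =====
-- def extract_repo_name(remote_name):
--     segs = remote_name.split('/')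
--     last = len(segs) - 1
--     i = 1 if (0 < last and segs[0] == '') else 0
--     count = 0
--     while True:
--         if i < last and segs[i] == 'svn':
--             i += 1
--         if i < last and segs[i] == 'packages':
--             count += 1
--             i += 1
--         else:
--             break
--     return 'packages/' * count + segs[i]
-- ===== Notes on version B (the rewrite author's own statement) =====
-- stated objective: alternative
-- what changed: B splits the path into segments once and walks an index over the fixed segment list with a counter of emitted package prefixes, instead of A's recursion that repeatedly re-slices the string and re-strips the leading separator and prefixes at every level.
import Mathlib
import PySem

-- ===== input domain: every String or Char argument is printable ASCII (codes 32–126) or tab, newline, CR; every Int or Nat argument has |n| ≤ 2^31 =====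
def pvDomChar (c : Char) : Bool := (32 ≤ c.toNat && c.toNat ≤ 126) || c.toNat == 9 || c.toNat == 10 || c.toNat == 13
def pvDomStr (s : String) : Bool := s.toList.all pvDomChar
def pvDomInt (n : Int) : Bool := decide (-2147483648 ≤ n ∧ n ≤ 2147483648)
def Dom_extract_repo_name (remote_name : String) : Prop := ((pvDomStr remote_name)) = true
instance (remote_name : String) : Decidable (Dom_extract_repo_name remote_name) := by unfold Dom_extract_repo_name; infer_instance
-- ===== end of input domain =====

-- B splits the path into segments once and walks an index over the segment list with a counter of
-- emitted package prefixes, instead of A's recursion on the string with repeated slicing; objective: alternative.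

-- ===== PORT A =====
-- A-side helpers: the two reassignments 'remote_name = …' at the top of A
def pvA_stripSlash (cs : List Char) : List Char :=
  if PySem.List.pyGet? cs 0 = some '/' then PySem.List.slice cs (some 1) none else cs
def pvA_stripSvn (cs : List Char) : List Char :=
  if PySem.Chars.startswith cs "svn/".toList then PySem.List.slice cs (some 4) none else cs

theorem pvA_strips_le (cs : List Char) : (pvA_stripSvn (pvA_stripSlash cs)).length ≤ cs.length := by
  unfold pvA_stripSvn pvA_stripSlash
  split <;> split <;>
    simp [PySem.List.slice_from _ (show (0:Int) ≤ 4 by omega),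
          PySem.List.slice_from _ (show (0:Int) ≤ 1 by omega)]

theorem pv_pack_len {cs : List Char} (h : PySem.Chars.startswith cs "packages/".toList = true) :
    9 ≤ cs.length := by
  have := List.IsPrefix.length_le ((PySem.Chars.startswith_iff _ _).mp h)
  simpa using this

theorem pv_drop8_lt {cs cs2 : List Char} (hle : cs2.length ≤ cs.length)
    (h : PySem.Chars.startswith cs2 "packages/".toList = true) :
    (PySem.List.slice cs2 (some 8) none).length < cs.length := by
  have h9 := pv_pack_len h
  simp [PySem.List.slice_from _ (show (0:Int) ≤ 8 by omega)]
  omega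

-- literal transliteration of A's recursion, on the code-point list
def extract_repo_name_core (cs : List Char) : List Char :=
  if h : PySem.Chars.startswith (pvA_stripSvn (pvA_stripSlash cs)) "packages/".toList then
    "packages/".toList ++
      extract_repo_name_core (PySem.List.slice (pvA_stripSvn (pvA_stripSlash cs)) (some 8) none)
  else
    if PySem.Chars.find (pvA_stripSvn (pvA_stripSlash cs)) "/".toList < 0 then
      pvA_stripSvn (pvA_stripSlash cs)
    else
      PySem.List.slice (pvA_stripSvn (pvA_stripSlash cs)) none
        (some (PySem.Chars.find (pvA_stripSvn (pvA_stripSlash cs)) "/".toList))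
termination_by cs.length
decreasing_by exact pv_drop8_lt (pvA_strips_le cs) h

def extract_repo_name (remote_name : String) : String :=
  String.ofList (extract_repo_name_core remote_name.toList)

-- ===== PORT B =====
-- B-side helper: the 'if … segs[i] == 'svn': i += 1' step at the top of the loop body
def pvB_svnStep (segs : List (List Char)) (last i : Nat) : Nat :=
  if i < last ∧ segs.getD i [] = "svn".toList then i + 1 else i

theorem pvB_svnStep_ge (segs : List (List Char)) (last i : Nat) : i ≤ pvB_svnStep segs last i := by
  unfold pvB_svnStep; split <;> omega

-- literal transliteration of B's while-loop: returns the final (count, i)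
def extract_repo_name_alt_loop (segs : List (List Char)) (last i count : Nat) : Nat × Nat :=
  let i1 := pvB_svnStep segs last i
  if h : i1 < last ∧ segs.getD i1 [] = "packages".toList then
    extract_repo_name_alt_loop segs last (i1 + 1) (count + 1)
  else
    (count, i1)
termination_by last - i
decreasing_by have := pvB_svnStep_ge segs last i; omega

-- Source B: split('/') once, skip an optional leading empty segment, run the loop, join the result
def extract_repo_name_alt (remote_name : String) : String :=
  let segs := remote_name.toList.splitOn '/'
  let last := segs.length - 1
  let i0 := if 0 < last ∧ segs.getD 0 [] = [] then 1 else 0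
  let r := extract_repo_name_alt_loop segs last i0 0
  String.ofList ((List.replicate r.1 "packages/".toList).flatten ++ segs.getD r.2 [])

-- ===== PRECONDITION & SPEC =====
-- A evaluates remote_name[0] first, so it raises IndexError on the empty string; Pre_ excludes exactly it.
def Pre_extract_repo_name (remote_name : String) : Prop := remote_name ≠ ""
instance (remote_name : String) : Decidable (Pre_extract_repo_name remote_name) := by unfold Pre_extract_repo_name; infer_instance
def pvWitness_extract_repo_name : String := "svn/packages/foo/bar"

def Spec_extract_repo_name (remote_name : String) (out : String) : Prop := out = extract_repo_name_alt remote_name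
instance (remote_name : String) (out : String) : Decidable (Spec_extract_repo_name remote_name out) := by unfold Spec_extract_repo_name; infer_instance

-- ===== CLAIM (what is proved, stated in full; the proofs are below) =====
def Claim_equal_extract_repo_name : Prop := ∀ (remote_name : String), Dom_extract_repo_name remote_name → Pre_extract_repo_name remote_name → Spec_extract_repo_name remote_name (extract_repo_name remote_name)

-- ===== LEMMAS AND PROOFS =====

-- proof-side middle layer: the algorithm on the segment list
def pvStrip0 (segs : List (List Char)) : List (List Char) :=
  if 2 ≤ segs.length ∧ segs.headI = [] then segs.tail else segs

def pvSvnSeg (segs : List (List Char)) : List (List Char) :=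
  if 2 ≤ segs.length ∧ segs.headI = "svn".toList then segs.tail else segs

theorem pvSvnSeg_le (segs : List (List Char)) : (pvSvnSeg segs).length ≤ segs.length := by
  unfold pvSvnSeg; split <;> simp [List.length_tail]

def pvSegB (segs : List (List Char)) : List Char :=
  if h : 2 ≤ (pvSvnSeg segs).length ∧ (pvSvnSeg segs).headI = "packages".toList then
    "packages/".toList ++ pvSegB (pvSvnSeg segs).tail
  else
    (pvSvnSeg segs).headI
termination_by segs.length
decreasing_by
  have h1 := pvSvnSeg_le segs
  have h2 := h.1
  simp only [List.length_tail]; omega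

-- basic splitOn facts
theorem pv_splitOn_sep (t : List Char) : ('/' :: t).splitOn '/' = [] :: t.splitOn '/' := by
  simp [List.splitOn, List.splitOnP_cons]

theorem pv_splitOn_ne {c : Char} (hc : c ≠ '/') (t : List Char) :
    (c :: t).splitOn '/' = (t.splitOn '/').modifyHead (List.cons c) := by
  simp [List.splitOn, List.splitOnP_cons, hc]

theorem pv_splitOn_ne_nil (cs : List Char) : cs.splitOn '/' ≠ [] := List.splitOnP_ne_nil _ _

theorem pv_headI_splitOn (cs : List Char) :
    (cs.splitOn '/').headI = cs.takeWhile (· ≠ '/') := by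
  induction cs with
  | nil => simp [List.splitOn, List.splitOnP_nil]
  | cons c t ih =>
    by_cases hc : c = '/'
    · subst hc; rw [pv_splitOn_sep]; simp
    · rw [pv_splitOn_ne hc]
      obtain ⟨a, as, ha⟩ := List.exists_cons_of_ne_nil (pv_splitOn_ne_nil t)
      rw [ha] at ih ⊢
      simp_all

theorem pv_two_le_splitOn (cs : List Char) :
    2 ≤ (cs.splitOn '/').length ↔ '/' ∈ cs := by
  induction cs with
  | nil => simp [List.splitOn, List.splitOnP_nil]
  | cons c t ih =>
    by_cases hc : c = '/'
    · subst hc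
      rw [pv_splitOn_sep]
      have := List.length_pos_of_ne_nil (pv_splitOn_ne_nil t)
      simp; omega
    · rw [pv_splitOn_ne hc]
      simp only [List.length_modifyHead, ih, List.mem_cons]
      exact ⟨Or.inr, fun h => h.elim (fun hh => absurd hh.symm hc) id⟩

theorem pv_splitOn_no_sep {cs : List Char} (h : '/' ∉ cs) : cs.splitOn '/' = [cs] := by
  induction cs with
  | nil => simp [List.splitOn, List.splitOnP_nil]
  | cons c t ih =>
    have hc : c ≠ '/' := fun hh => h (hh ▸ List.mem_cons_self ..)
    rw [pv_splitOn_ne hc, ih (fun hm => h (List.mem_cons_of_mem _ hm))]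
    rfl

theorem pv_splitOn_word {w : List Char} (hw : '/' ∉ w) (t : List Char) :
    (w ++ '/' :: t).splitOn '/' = w :: t.splitOn '/' := by
  induction w with
  | nil => simpa using pv_splitOn_sep t
  | cons c w' ih =>
    have hc : c ≠ '/' := fun hh => hw (hh ▸ List.mem_cons_self ..)
    rw [List.cons_append, pv_splitOn_ne hc, ih (fun hm => hw (List.mem_cons_of_mem _ hm))]
    rfl

-- startswith (w ++ "/") on the char list ↔ segment shape, for a slash-free word w
theorem pv_startswith_iff_seg {w cs : List Char} (hw : '/' ∉ w) :
    PySem.Chars.startswith cs (w ++ ['/']) = true ↔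
      (2 ≤ (cs.splitOn '/').length ∧ (cs.splitOn '/').headI = w) := by
  constructor
  · intro h
    obtain ⟨t, ht⟩ := (PySem.Chars.startswith_iff _ _).mp h
    rw [List.append_assoc, List.singleton_append] at ht
    subst ht
    rw [pv_splitOn_word hw]
    have := List.length_pos_of_ne_nil (pv_splitOn_ne_nil t)
    constructor
    · simp; omega
    · rfl
  · rintro ⟨hlen, hhead⟩
    have hmem : '/' ∈ cs := (pv_two_le_splitOn cs).mp hlen
    rw [pv_headI_splitOn] at hhead
    have hne : cs.dropWhile (· ≠ '/') ≠ [] := by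
      intro hnil
      have : cs = cs.takeWhile (· ≠ '/') := by
        conv_lhs => rw [← List.takeWhile_append_dropWhile (p := (· ≠ '/')) (l := cs)]
        rw [hnil, List.append_nil]
      rw [this] at hmem
      have := List.mem_takeWhile_imp hmem
      simp at this
    obtain ⟨d, ds, hds⟩ := List.exists_cons_of_ne_nil hne
    have hd : d = '/' := by
      have h2 := List.head_dropWhile_not (· ≠ '/') hne
      have h' : List.dropWhile (fun x => !decide (x = '/')) cs = d :: ds := by simpa using hds
      have h3 : (List.dropWhile (fun x => !decide (x = '/')) cs).head (by simp [h']) = d := by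
        simp [h']
      rw [← h3]
      simpa using h2
    have hcs : cs = w ++ '/' :: ds := by
      conv_lhs => rw [← List.takeWhile_append_dropWhile (p := (· ≠ '/')) (l := cs)]
      rw [hhead, hds, hd]
    rw [PySem.Chars.startswith_iff, hcs]
    exact ⟨ds, by simp⟩

theorem pv_splitOn_of_startswith {w cs : List Char} (hw : '/' ∉ w)
    (h : PySem.Chars.startswith cs (w ++ ['/']) = true) :
    cs.splitOn '/' = w :: (cs.drop (w.length + 1)).splitOn '/' := by
  obtain ⟨t, ht⟩ := (PySem.Chars.startswith_iff _ _).mp h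
  subst ht
  have hdrop : ((w ++ ['/']) ++ t).drop (w.length + 1) = t := by
    have : w.length + 1 = (w ++ ['/']).length := by simp
    rw [this, List.drop_left]
  rw [hdrop, List.append_assoc, List.singleton_append, pv_splitOn_word hw]

-- A-side: strips on chars = strips on segments
theorem pv_strip0_eq (cs : List Char) :
    pvStrip0 (cs.splitOn '/') = (pvA_stripSlash cs).splitOn '/' := by
  rcases cs with _ | ⟨c, t⟩
  · simp [pvStrip0, pvA_stripSlash, List.splitOn, List.splitOnP_nil, PySem.List.pyGet?,
      PySem.List.pyIdx?]
  · by_cases hc : c = '/'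
    · subst hc
      rw [pv_splitOn_sep]
      have hlen := List.length_pos_of_ne_nil (pv_splitOn_ne_nil t)
      have hsl : pvA_stripSlash ('/' :: t) = t := by
        simp [pvA_stripSlash, PySem.List.pyGet?, PySem.List.pyIdx?,
          PySem.List.slice_from _ (show (0:Int) ≤ 1 by omega)]
      rw [hsl, pvStrip0, if_pos ⟨by simp; omega, rfl⟩]
      rfl
    · have hA : pvA_stripSlash (c :: t) = c :: t := by
        simp [pvA_stripSlash, PySem.List.pyGet?, PySem.List.pyIdx?, hc]
      rw [hA, pv_splitOn_ne hc]
      obtain ⟨a, as, ha⟩ := List.exists_cons_of_ne_nil (pv_splitOn_ne_nil t)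
      rw [ha]
      simp [pvStrip0]

theorem pv_svnstrip_eq (cs : List Char) :
    pvSvnSeg (cs.splitOn '/') = (pvA_stripSvn cs).splitOn '/' := by
  have hw : '/' ∉ "svn".toList := by decide
  have heq : "svn/".toList = "svn".toList ++ ['/'] := rfl
  by_cases h : PySem.Chars.startswith cs ("svn".toList ++ ['/']) = true
  · have hsplit := pv_splitOn_of_startswith hw h
    have hiff := (pv_startswith_iff_seg hw).mp h
    have hA : pvA_stripSvn cs = cs.drop 4 := by
      rw [pvA_stripSvn, if_pos (heq ▸ h), PySem.List.slice_from _ (show (0:Int) ≤ 4 by omega)]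
      rfl
    unfold pvSvnSeg
    rw [if_pos hiff, hsplit, hA]
    rfl
  · have hA : pvA_stripSvn cs = cs := by
      rw [pvA_stripSvn, if_neg (heq ▸ h)]
    rw [hA]
    unfold pvSvnSeg
    rw [if_neg (fun hcontra => h ((pv_startswith_iff_seg hw).mpr hcontra))]

theorem pv_take_eq_takeWhile (cs : List Char) (j : Nat)
    (hpre : ['/'] <+: cs.drop j) (hmin : ∀ i < j, ¬ ['/'] <+: cs.drop i) :
    cs.take j = cs.takeWhile (· ≠ '/') := by
  induction cs generalizing j with
  | nil => simp at hpre
  | cons c t ih =>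
    cases j with
    | zero =>
      have hc : '/' = c := by simpa [List.cons_prefix_cons] using hpre
      simp [List.takeWhile_cons, ← hc]
    | succ k =>
      have hc : c ≠ '/' := fun hcc => hmin 0 (Nat.succ_pos k) (by simp [hcc, List.cons_prefix_cons])
      rw [List.take_succ_cons, List.takeWhile_cons]
      rw [ih k (by simpa using hpre) (fun i hi => by simpa using hmin (i+1) (by omega))]
      simp [hc]

-- A's base case computes the first segment
theorem pv_base_eq (cs : List Char) :
    (if PySem.Chars.find cs "/".toList < 0 then cs
     else PySem.List.slice cs none (some (PySem.Chars.find cs "/".toList)))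
      = (cs.splitOn '/').headI := by
  by_cases h : PySem.Chars.find cs "/".toList < 0
  · have h1 : PySem.Chars.find cs "/".toList = -1 := by
      have := PySem.Chars.neg_one_le_find cs "/".toList
      omega
    have h3 : '/' ∉ cs := fun hm =>
      (PySem.Chars.find_eq_neg_one_iff _ _).mp h1 ((List.singleton_infix_iff '/' cs).mpr hm)
    rw [if_pos h, pv_splitOn_no_sep h3]
    rfl
  · rw [if_neg h]
    have h0 : (0:Int) ≤ PySem.Chars.find cs "/".toList := by omega
    obtain ⟨hpre, hmin⟩ := PySem.Chars.find_spec h0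
    rw [PySem.List.slice_to _ h0, pv_headI_splitOn]
    exact pv_take_eq_takeWhile cs _ hpre hmin

theorem pv_strip0_cons_nil {segs : List (List Char)} (h : segs ≠ []) :
    pvStrip0 ([] :: segs) = segs := by
  have := List.length_pos_of_ne_nil h
  rw [pvStrip0, if_pos ⟨by simp; omega, rfl⟩]
  rfl

-- MAIN, A side: the char recursion equals the segment recursion
theorem pv_core_eq_segB (cs : List Char) :
    extract_repo_name_core cs = pvSegB (pvStrip0 (cs.splitOn '/')) := by
  have hw : '/' ∉ "packages".toList := by decide
  induction cs using extract_repo_name_core.induct with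
  | case1 x h ih =>
    have hpack : PySem.Chars.startswith (pvA_stripSvn (pvA_stripSlash x))
        ("packages".toList ++ ['/']) = true := h
    rw [extract_repo_name_core, dif_pos h, pv_strip0_eq, pvSegB, pv_svnstrip_eq,
      dif_pos ((pv_startswith_iff_seg hw).mp hpack)]
    congr 1
    rw [ih, pv_splitOn_of_startswith hw hpack]
    simp only [List.tail_cons]
    congr 1
    obtain ⟨t, ht⟩ := (PySem.Chars.startswith_iff _ _).mp hpack
    rw [← ht, PySem.List.slice_from _ (show (0:Int) ≤ 8 by omega)]
    have e1 : (("packages".toList ++ ['/']) ++ t).drop ((8:Int).toNat) = '/' :: t := by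
      rw [List.append_assoc, List.singleton_append]
      simpa using List.drop_left "packages".toList ('/' :: t)
    have e2 : (("packages".toList ++ ['/']) ++ t).drop ("packages".toList.length + 1) = t := by
      have hl : "packages".toList.length + 1 = ("packages".toList ++ ['/']).length := by simp
      rw [hl, List.drop_left]
    rw [e1, e2, pv_splitOn_sep, pv_strip0_cons_nil (pv_splitOn_ne_nil t)]
  | case2 x h hj =>
    rw [extract_repo_name_core, dif_neg h, pv_strip0_eq, pvSegB, pv_svnstrip_eq,
      dif_neg (fun hcontra => h ((pv_startswith_iff_seg hw).mpr hcontra))]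
    exact pv_base_eq _
  | case3 x h hj =>
    rw [extract_repo_name_core, dif_neg h, pv_strip0_eq, pvSegB, pv_svnstrip_eq,
      dif_neg (fun hcontra => h ((pv_startswith_iff_seg hw).mpr hcontra))]
    exact pv_base_eq _

-- B-side: index arithmetic on the fixed segment list
theorem pv_getD_headI (segs : List (List Char)) (i : Nat) :
    segs.getD i [] = (segs.drop i).headI := by
  rw [List.getD_eq_getElem?_getD, ← List.head?_drop]
  cases segs.drop i with
  | nil => simp; rfl
  | cons a as => simp

theorem pv_svnStep_le_last (segs : List (List Char)) (last i : Nat) (hi : i ≤ last) :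
    pvB_svnStep segs last i ≤ last := by
  unfold pvB_svnStep; split <;> omega

theorem pv_svnSeg_drop (segs : List (List Char)) (last i : Nat)
    (hlast : last = segs.length - 1) (hne : segs ≠ []) :
    pvSvnSeg (segs.drop i) = segs.drop (pvB_svnStep segs last i) := by
  have hlp := List.length_pos_of_ne_nil hne
  unfold pvSvnSeg pvB_svnStep
  by_cases hc : i < last ∧ segs.getD i [] = "svn".toList
  · rw [if_pos ⟨by rw [List.length_drop]; omega, by rw [← pv_getD_headI]; exact hc.2⟩,
      if_pos hc, List.tail_drop]
  · rw [if_neg hc, if_neg (fun hcon => hc ⟨by rw [List.length_drop] at hcon; omega,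
      by rw [pv_getD_headI]; exact hcon.2⟩)]

-- MAIN, B side: the index loop equals the segment recursion
theorem pv_loop_eq_segB (segs : List (List Char)) (last : Nat)
    (hlast : last = segs.length - 1) (hne : segs ≠ []) :
    ∀ (i count : Nat), i ≤ last →
    (List.replicate (extract_repo_name_alt_loop segs last i count).1
        "packages/".toList).flatten
      ++ segs.getD (extract_repo_name_alt_loop segs last i count).2 []
    = (List.replicate count "packages/".toList).flatten ++ pvSegB (segs.drop i) := by
  intro i count
  induction i, count using extract_repo_name_alt_loop.induct segs last with
  | case1 i count i1 h ih =>
    intro hi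
    simp only [i1] at h ih
    have hlp := List.length_pos_of_ne_nil hne
    have hstep := pv_svnStep_le_last segs last i hi
    rw [extract_repo_name_alt_loop]
    simp only [dif_pos h]
    rw [ih (by omega)]
    conv_rhs => rw [pvSegB]
    rw [pv_svnSeg_drop segs last i hlast hne,
      dif_pos ⟨by rw [List.length_drop]; omega, by rw [← pv_getD_headI]; exact h.2⟩,
      List.tail_drop]
    rw [List.replicate_succ' , List.flatten_append]
    simp [List.append_assoc]
  | case2 i count i1 h =>
    intro hi
    simp only [i1] at h
    have hlp := List.length_pos_of_ne_nil hne
    have hstep := pv_svnStep_le_last segs last i hi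
    rw [extract_repo_name_alt_loop]
    simp only [dif_neg h]
    rw [pvSegB, pv_svnSeg_drop segs last i hlast hne,
      dif_neg (fun hcon => h ⟨by rw [List.length_drop] at hcon; omega,
        by rw [pv_getD_headI]; exact hcon.2⟩)]
    rw [pv_getD_headI]

theorem pv_alt_eq_segB (s : String) :
    (extract_repo_name_alt s).toList = pvSegB (pvStrip0 (s.toList.splitOn '/')) := by
  rw [extract_repo_name_alt]
  have hne := pv_splitOn_ne_nil s.toList
  have hlp := List.length_pos_of_ne_nil hne
  by_cases h0 : 0 < (s.toList.splitOn '/').length - 1 ∧ (s.toList.splitOn '/').getD 0 [] = []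
  · simp only [if_pos h0, String.toList_ofList]
    rw [pv_loop_eq_segB _ _ rfl hne 1 0 (by omega)]
    have : pvStrip0 (s.toList.splitOn '/') = (s.toList.splitOn '/').drop 1 := by
      rw [pvStrip0, if_pos ⟨by omega, by rw [pv_getD_headI] at h0; simpa using h0.2⟩]
      rw [List.drop_one]
    rw [this]
    simp
  · simp only [if_neg h0, String.toList_ofList]
    rw [pv_loop_eq_segB _ _ rfl hne 0 0 (by omega)]
    have : pvStrip0 (s.toList.splitOn '/') = s.toList.splitOn '/' := by
      rw [pvStrip0, if_neg (fun hcon => h0 ⟨by omega, by rw [pv_getD_headI]; simpa using hcon.2⟩)]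
    rw [this]
    simp

-- ===== VERDICT (by name: the statement is the Claim_ definition above) =====
theorem extract_repo_name_spec : Claim_equal_extract_repo_name := by
  intro s _ _
  unfold Spec_extract_repo_name extract_repo_name
  rw [pv_core_eq_segB, ← pv_alt_eq_segB s, String.ofList_toList]
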